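-- pv_equiv track=rewrite | github.com/Ohzzi/Algorithm | Programmers/Lv1/모의고사/Lv1_모의고사.py | solution
-- ===== SOURCE A (Python) =====
-- def solution(answers):
--     answer = []
--     first = [1, 2, 3, 4, 5]
--     second = [2, 1, 2, 3, 2, 4, 2, 5]
--     third = [3, 3, 1, 1, 2, 2, 4, 4, 5, 5]
--     score = [0, 0, 0]
--     """
--     for i in range (len(answers)):
--         if first[i%5] == answers[i]:
--             score[0] += 1
--         if second[i%8] == answers[i]:
--             score[1] += 1
--         if third[i%10] == answers[i]:
--             score[2] += 1
--     for i in range(3):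
--         if score[i] == max(score):
--             answer.append(i+1)
--     """
--     for i, ans in enumerate(answers):
--         # range 대신 enumerate 사용. enumerate(answers)는 (index, value)를 반환
--         if first[i%5] == ans:
--             score[0] += 1
--         if second[i%8] == ans:
--             score[1] += 1
--         if third[i%10] == ans:
--             score[2] += 1
--     for i, s in enumerate(score):
--         if s == max(score):
--             answer.append(i+1)
--     return answer
-- ===== SOURCE B (Python) =====
-- def solution(answers):
--     # Frequency table keyed by (index mod 40, answer); 40 = lcm(5, 8, 10) is a
--     # common period of all three patterns, so each student's score is a sum of
--     # table entries over the 40 residue classes instead of a scan of answers.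
--     counts = {}
--     for i, ans in enumerate(answers):
--         key = (i % 40, ans)
--         counts[key] = counts.get(key, 0) + 1
--     patterns = [[1, 2, 3, 4, 5],
--                 [2, 1, 2, 3, 2, 4, 2, 5],
--                 [3, 3, 1, 1, 2, 2, 4, 4, 5, 5]]
--     scores = [sum(counts.get((r, p[r % len(p)]), 0) for r in range(40))
--               for p in patterns]
--     best = max(scores)
--     return [i + 1 for i, s in enumerate(scores) if s == best]
-- ===== Notes on version B (the rewrite author's own statement) =====
-- stated objective: alternative
-- what changed: Instead of comparing every answer against the three patterns, B builds a frequency dictionary keyed by (index mod 40, answer) in one aggregation pass (40 = lcm of the pattern lengths) and then computes each student's score as a sum of 40 table lookups.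
import Mathlib
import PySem

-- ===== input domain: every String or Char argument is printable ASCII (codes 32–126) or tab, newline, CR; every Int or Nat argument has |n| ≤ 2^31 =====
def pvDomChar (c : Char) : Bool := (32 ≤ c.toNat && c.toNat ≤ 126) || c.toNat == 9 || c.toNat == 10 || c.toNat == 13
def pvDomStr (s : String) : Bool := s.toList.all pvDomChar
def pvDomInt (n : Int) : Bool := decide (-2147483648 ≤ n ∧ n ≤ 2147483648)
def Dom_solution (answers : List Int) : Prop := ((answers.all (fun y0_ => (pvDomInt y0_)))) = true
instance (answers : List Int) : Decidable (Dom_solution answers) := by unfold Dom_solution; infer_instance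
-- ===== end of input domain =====

-- B replaces A's element-by-element comparison of every answer against the three
-- patterns by a frequency dictionary keyed by (index mod 40, answer) built in one
-- aggregation pass (40 = lcm of the pattern lengths), scoring each student from the
-- 40-entry table; objective: alternative algorithm, same asymptotic cost.

-- ===== PORT A =====
-- A's three fixed answer sheets
def pvFirst : List Int := [1, 2, 3, 4, 5]
def pvSecond : List Int := [2, 1, 2, 3, 2, 4, 2, 5]
def pvThird : List Int := [3, 3, 1, 1, 2, 2, 4, 4, 5, 5]

-- single pass over enumerate(answers), the Python list score=[s0,s1,s2] carried as a triple
def solution (answers : List Int) : List Int :=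
  let score :=
    (PySem.List.enumerate answers 0).foldl
      (fun (s : Int × Int × Int) p =>
        let s0 := if PySem.List.pyGetD pvFirst (PySem.Int.mod p.1 5) 0 = p.2 then s.1 + 1 else s.1
        let s1 := if PySem.List.pyGetD pvSecond (PySem.Int.mod p.1 8) 0 = p.2 then s.2.1 + 1 else s.2.1
        let s2 := if PySem.List.pyGetD pvThird (PySem.Int.mod p.1 10) 0 = p.2 then s.2.2 + 1 else s.2.2
        (s0, s1, s2))
      (0, 0, 0)
  let scoreL := [score.1, score.2.1, score.2.2]
  (PySem.List.enumerate scoreL 0).foldl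
    (fun acc q => if q.2 = (PySem.List.max? scoreL (fun y => y)).getD 0 then acc ++ [q.1 + 1] else acc) []

-- ===== PORT B =====
-- counts[(i % 40, ans)] += 1   (dict built with get-default + insert, as in Source B)
def altCounts (answers : List Int) : PySem.Dict (Int × Int) Int :=
  (PySem.List.enumerate answers 0).foldl
    (fun d q =>
      let k := (PySem.Int.mod q.1 40, q.2)
      d.insert k (d.getD k 0 + 1))
    PySem.Dict.empty

-- sum(counts.get((r, p[r % len(p)]), 0) for r in range(40))
def altScore (counts : PySem.Dict (Int × Int) Int) (p : List Int) : Int :=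
  ((PySem.List.pyRange 0 40 1).map
    (fun r => counts.getD (r, PySem.List.pyGetD p (PySem.Int.mod r (p.length : Int)) 0) 0)).sum

def solution_alt (answers : List Int) : List Int :=
  let counts := altCounts answers
  let patterns : List (List Int) :=
    [[1, 2, 3, 4, 5], [2, 1, 2, 3, 2, 4, 2, 5], [3, 3, 1, 1, 2, 2, 4, 4, 5, 5]]
  let scores := patterns.map (fun p => altScore counts p)
  let best := (PySem.List.max? scores (fun y => y)).getD 0
  (PySem.List.enumerate scores 0).filterMap
    (fun q => if q.2 = best then some (q.1 + 1) else none)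

-- ===== PRECONDITION & SPEC =====
def Spec_solution (answers : List Int) (out : List Int) : Prop := out = solution_alt answers
instance (answers : List Int) (out : List Int) : Decidable (Spec_solution answers out) := by unfold Spec_solution; infer_instance

-- ===== CLAIM (what is proved, stated in full; the proofs are below) =====
def Claim_equal_solution : Prop := ∀ (answers : List Int), Dom_solution answers → Spec_solution answers (solution answers)

-- ===== LEMMAS AND PROOFS =====

-- number of matches of pattern p (cycled modulo m) against l, starting at index i
def pvCnt (p : List Int) (m : Int) : Int → List Int → Int
  | _, [] => 0
  | i, a :: t => (if PySem.List.pyGetD p (PySem.Int.mod i m) 0 = a then 1 else 0) + pvCnt p m (i + 1) t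

-- the (index mod 40, answer) key list B's dictionary counts
def pvKeys : Int → List Int → List (Int × Int)
  | _, [] => []
  | i, a :: t => (PySem.Int.mod i 40, a) :: pvKeys (i + 1) t

theorem pvA_loop (l : List Int) : ∀ (i s0 s1 s2 : Int),
    (PySem.List.enumerate l i).foldl
      (fun (s : Int × Int × Int) p =>
        let t0 := if PySem.List.pyGetD pvFirst (PySem.Int.mod p.1 5) 0 = p.2 then s.1 + 1 else s.1
        let t1 := if PySem.List.pyGetD pvSecond (PySem.Int.mod p.1 8) 0 = p.2 then s.2.1 + 1 else s.2.1
        let t2 := if PySem.List.pyGetD pvThird (PySem.Int.mod p.1 10) 0 = p.2 then s.2.2 + 1 else s.2.2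
        (t0, t1, t2))
      (s0, s1, s2)
    = (s0 + pvCnt pvFirst 5 i l, s1 + pvCnt pvSecond 8 i l, s2 + pvCnt pvThird 10 i l) := by
  induction l with
  | nil => intro i s0 s1 s2; simp [pvCnt, PySem.List.enumerate_nil]
  | cons a t ih =>
    intro i s0 s1 s2
    simp only [PySem.List.enumerate_cons, List.foldl_cons, ih, pvCnt]
    split_ifs <;> simp <;> omega

-- B's dictionary is Counter(pvKeys 0 answers)
theorem pvCounts_eq (answers : List Int) :
    altCounts answers = PySem.Dict.counter (pvKeys 0 answers) := by
  unfold altCounts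
  rw [← PySem.Dict.foldl_insert_getD_add_one_eq_counter]
  have h : ∀ (l : List Int) (i : Int) (d : PySem.Dict (Int × Int) Int),
      (PySem.List.enumerate l i).foldl
        (fun d q =>
          let k := (PySem.Int.mod q.1 40, q.2)
          d.insert k (d.getD k 0 + 1)) d
      = (pvKeys i l).foldl (fun d k => d.insert k (d.getD k 0 + 1)) d := by
    intro l
    induction l with
    | nil => intro i d; simp [pvKeys, PySem.List.enumerate_nil]
    | cons a t ih => intro i d; simp only [PySem.List.enumerate_cons, pvKeys, List.foldl_cons, ih]
  exact h answers 0 PySem.Dict.empty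

-- indicator sums over a nodup list of residues
theorem pvIndSum_zero (pr : Int → Int) (r0 v : Int) (rs : List Int) (hnm : r0 ∉ rs) :
    (rs.map (fun r => if ((r, pr r) : Int × Int) = (r0, v) then (1 : Int) else 0)).sum = 0 := by
  induction rs with
  | nil => simp
  | cons x xs ih =>
    simp only [List.mem_cons, not_or] at hnm
    simp only [List.map_cons, List.sum_cons, ih hnm.2]
    rw [if_neg (fun h => hnm.1 (congrArg Prod.fst h).symm)]
    simp

theorem pvIndSum (pr : Int → Int) (r0 v : Int) (rs : List Int) (hnd : rs.Nodup) (hmem : r0 ∈ rs) :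
    (rs.map (fun r => if ((r, pr r) : Int × Int) = (r0, v) then (1 : Int) else 0)).sum
    = if pr r0 = v then 1 else 0 := by
  induction rs with
  | nil => cases hmem
  | cons x xs ih =>
    simp only [List.map_cons, List.sum_cons]
    rcases List.mem_cons.mp hmem with h | h
    · subst h
      rw [pvIndSum_zero pr r0 v xs (List.nodup_cons.mp hnd).1]
      simp [Prod.ext_iff]
    · have hx : ¬ x = r0 := fun he => (List.nodup_cons.mp hnd).1 (he ▸ h)
      rw [ih (List.nodup_cons.mp hnd).2 h, if_neg (fun he => hx (congrArg Prod.fst he))]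
      simp

-- key lemma: summing the table over the 40 residues recovers the direct match count,
-- for any pattern length dividing 40
theorem pvSum_counts (p : List Int) (m : Int)
    (hpos : 0 < m) (hdvd : m ∣ 40) (l : List Int) : ∀ (i : Int), 0 ≤ i →
    ((PySem.List.pyRange 0 40 1).map
      (fun r => ((pvKeys i l).count (r, PySem.List.pyGetD p (PySem.Int.mod r m) 0) : Int))).sum
    = pvCnt p m i l := by
  induction l with
  | nil => intro i _; simp [pvKeys, pvCnt]
  | cons a t ih =>
    intro i hi
    have hcnt : ∀ r : Int,
        ((pvKeys i (a :: t)).count (r, PySem.List.pyGetD p (PySem.Int.mod r m) 0) : Int)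
        = ((pvKeys (i+1) t).count (r, PySem.List.pyGetD p (PySem.Int.mod r m) 0) : Int)
          + (if ((r, PySem.List.pyGetD p (PySem.Int.mod r m) 0) : Int × Int)
               = (PySem.Int.mod i 40, a) then (1 : Int) else 0) := by
      intro r
      simp only [pvKeys, List.count_cons, beq_iff_eq]
      by_cases h : ((r, PySem.List.pyGetD p (PySem.Int.mod r m) 0) : Int × Int)
          = (PySem.Int.mod i 40, a)
      · rw [if_pos h.symm, if_pos h]; push_cast; ring
      · rw [if_neg (h ∘ Eq.symm), if_neg h]; push_cast; ring
    simp only [hcnt]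
    rw [PySem.List.sum_map_add_int (PySem.List.pyRange 0 40 1)
      (fun r => ((pvKeys (i+1) t).count (r, PySem.List.pyGetD p (PySem.Int.mod r m) 0) : Int))
      (fun r => if ((r, PySem.List.pyGetD p (PySem.Int.mod r m) 0) : Int × Int)
                  = (PySem.Int.mod i 40, a) then (1 : Int) else 0)]
    rw [ih (i + 1) (by omega)]
    have hmem : PySem.Int.mod i 40 ∈ PySem.List.pyRange 0 40 1 := by
      rw [PySem.List.mem_pyRange_one]
      exact ⟨PySem.Int.mod_nonneg i (by norm_num), PySem.Int.mod_lt i (by norm_num)⟩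
    rw [pvIndSum (fun r => PySem.List.pyGetD p (PySem.Int.mod r m) 0) (PySem.Int.mod i 40) a
        (PySem.List.pyRange 0 40 1) (PySem.List.nodup_pyRange_one 0 40) hmem]
    have hmm : PySem.Int.mod (PySem.Int.mod i 40) m = PySem.Int.mod i m := by
      rw [PySem.Int.mod_eq_emod_of_pos (by norm_num : (0:Int) < 40),
          PySem.Int.mod_eq_emod_of_pos hpos, PySem.Int.mod_eq_emod_of_pos hpos]
      exact Int.emod_emod_of_dvd i hdvd
    simp only [pvCnt, hmm]
    ring

-- B's score of pattern p equals the direct match count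
theorem pvB_score (answers : List Int) (p : List Int) (m : Int) (hm : (p.length : Int) = m)
    (hpos : 0 < m) (hdvd : m ∣ 40) :
    altScore (altCounts answers) p = pvCnt p m 0 answers := by
  unfold altScore
  rw [pvCounts_eq]
  simp only [PySem.Dict.getD_counter, hm]
  exact pvSum_counts p m hpos hdvd answers 0 le_rfl

-- ===== VERDICT (by name: the statement is the Claim_ definition above) =====
theorem solution_spec : Claim_equal_solution := by
  intro answers _
  unfold Spec_solution solution solution_alt
  simp only [pvA_loop]
  rw [show ([[1, 2, 3, 4, 5], [2, 1, 2, 3, 2, 4, 2, 5], [3, 3, 1, 1, 2, 2, 4, 4, 5, 5]] :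
        List (List Int)).map (fun p => altScore (altCounts answers) p)
      = [altScore (altCounts answers) pvFirst, altScore (altCounts answers) pvSecond,
         altScore (altCounts answers) pvThird] from rfl]
  rw [pvB_score answers pvFirst 5 (by decide) (by norm_num) (by norm_num),
      pvB_score answers pvSecond 8 (by decide) (by norm_num) (by norm_num),
      pvB_score answers pvThird 10 (by decide) (by norm_num) (by norm_num)]
  simp only [zero_add, PySem.List.enumerate_cons, PySem.List.enumerate_nil,
    List.foldl_cons, List.foldl_nil, List.filterMap_cons, List.filterMap_nil]
  split_ifs <;> rfl
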